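-- pv_equiv track=rewrite | github.com/waynegault/ancestry | gedcom_utils.py | _is_descendant_at_generation
-- ===== SOURCE A (Python) =====
-- def _is_descendant_at_generation(
--     ancestor_id: str,
--     descendant_id: str,
--     generations: int,
--     id_to_children: dict[str, set[str]]
-- ) -> bool:
--     """
--     Check if descendant_id is a descendant of ancestor_id at a specific generation level.
--
--     Args:
--         ancestor_id: ID of the ancestor
--         descendant_id: ID of the potential descendant
--         generations: Number of generations down (1=child, 2=grandchild, 3=great-grandchild, etc.)
--         id_to_children: Dictionary mapping individual IDs to their child IDs
--
--     Returns:
--         True if descendant_id is a descendant at the specified generation level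
--     """
--     if generations < 1:
--         return False
--
--     # Start with the ancestor
--     current_generation = {ancestor_id}
--
--     # Walk down the specified number of generations
--     for _ in range(generations):
--         next_generation = set()
--         for person_id in current_generation:
--             children = id_to_children.get(person_id, set())
--             next_generation.update(children)
--
--         if not next_generation:
--             return False  # No more descendants at this level
--
--         current_generation = next_generation
--
--     # Check if descendant_id is in the final generation
--     return descendant_id in current_generation
-- ===== SOURCE B (Python) =====
-- def _is_descendant_at_generation(
--     ancestor_id: str,
--     descendant_id: str,
--     generations: int,
--     id_to_children: dict[str, set[str]]
-- ) -> bool: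
--     """Walk UP from the descendant through a reverse (child -> parents) index."""
--     if generations < 1:
--         return False
--
--     # Build the reverse edge index once.
--     parents: dict[str, set[str]] = {}
--     for pid, kids in id_to_children.items():
--         for c in kids:
--             parents.setdefault(c, set()).add(pid)
--
--     # Walk up the specified number of generations from the descendant.
--     frontier = {descendant_id}
--     for _ in range(generations):
--         prev_generation = set()
--         for person_id in frontier:
--             prev_generation.update(parents.get(person_id, set()))
--         if not prev_generation:
--             return False
--         frontier = prev_generation
--
--     return ancestor_id in frontier
-- ===== Notes on version B (the rewrite author's own statement) =====
-- stated objective: alternative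
-- what changed: A walks a breadth-first frontier DOWN from the ancestor through id_to_children; B builds a reverse child-to-parents index once and walks the frontier UP from the descendant, checking the ancestor in the final generation. Pre_ only excludes association lists with duplicate keys, which no Python dict argument can realize.
import Mathlib
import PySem

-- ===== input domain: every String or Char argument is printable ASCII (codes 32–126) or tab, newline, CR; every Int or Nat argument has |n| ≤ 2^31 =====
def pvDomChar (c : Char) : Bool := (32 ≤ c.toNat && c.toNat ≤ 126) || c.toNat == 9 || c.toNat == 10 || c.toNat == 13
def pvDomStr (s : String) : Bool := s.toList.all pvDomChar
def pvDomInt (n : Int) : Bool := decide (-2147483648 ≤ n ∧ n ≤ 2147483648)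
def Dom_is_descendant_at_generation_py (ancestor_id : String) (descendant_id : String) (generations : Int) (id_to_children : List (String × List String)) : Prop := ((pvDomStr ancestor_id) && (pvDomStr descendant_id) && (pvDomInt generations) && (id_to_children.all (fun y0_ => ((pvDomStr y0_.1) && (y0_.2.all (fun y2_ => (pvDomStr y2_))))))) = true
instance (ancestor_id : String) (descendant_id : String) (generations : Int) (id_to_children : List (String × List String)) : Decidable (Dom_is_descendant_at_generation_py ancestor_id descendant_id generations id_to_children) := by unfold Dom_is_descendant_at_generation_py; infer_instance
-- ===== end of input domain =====

-- B replaces A's forward breadth-first walk from the ancestor by a single reverse (child -> parents)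
-- index built once, then the same number of steps walked UPWARD from the descendant (objective: alternative).

-- ===== PORT A =====
-- A's loop body: one generation step forward (next_generation built by set.update over children).
def pvALoop (id_to_children : List (String × List String)) (descendant_id : String) : Nat → PySem.Set String → Bool
  | 0, cur => PySem.Set.contains cur descendant_id
  | n + 1, cur =>
    let next := cur.foldl (fun acc p => PySem.Set.update acc ((PySem.Dict.mk id_to_children).getD p [])) PySem.Set.empty
    if next = PySem.Set.empty then false else pvALoop id_to_children descendant_id n next

def is_descendant_at_generation_py (ancestor_id : String) (descendant_id : String) (generations : Int) (id_to_children : List (String × List String)) : Bool :=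
  if generations < 1 then false
  else pvALoop id_to_children descendant_id generations.toNat (PySem.Set.ofList [ancestor_id])

-- ===== PORT B =====
-- parents[c] = set of pids with c in id_to_children[pid]  (dict built once by B)
def pvParents (id_to_children : List (String × List String)) : PySem.Dict String (PySem.Set String) :=
  id_to_children.foldl
    (fun P pr => pr.2.foldl (fun P c => P.modify c PySem.Set.empty (fun s => PySem.Set.add s pr.1)) P)
    PySem.Dict.empty

-- B's loop body: one generation step upward through the parents index.
def pvBLoop (parents : PySem.Dict String (PySem.Set String)) (ancestor_id : String) : Nat → PySem.Set String → Bool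
  | 0, cur => PySem.Set.contains cur ancestor_id
  | n + 1, cur =>
    let prev := cur.foldl (fun acc x => PySem.Set.update acc (parents.getD x PySem.Set.empty)) PySem.Set.empty
    if prev = PySem.Set.empty then false else pvBLoop parents ancestor_id n prev

def is_descendant_at_generation_py_alt (ancestor_id : String) (descendant_id : String) (generations : Int) (id_to_children : List (String × List String)) : Bool :=
  if generations < 1 then false
  else pvBLoop (pvParents id_to_children) ancestor_id generations.toNat (PySem.Set.ofList [descendant_id])

-- ===== PRECONDITION & SPEC =====
-- Pre_ excludes association lists with duplicate keys: a Python dict argument can never carry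
-- duplicate keys, so those lists denote no actual input of A; it excludes nothing A runs on.
def Pre_is_descendant_at_generation_py (ancestor_id : String) (descendant_id : String) (generations : Int) (id_to_children : List (String × List String)) : Prop :=
  (id_to_children.map Prod.fst).Nodup
instance (ancestor_id : String) (descendant_id : String) (generations : Int) (id_to_children : List (String × List String)) : Decidable (Pre_is_descendant_at_generation_py ancestor_id descendant_id generations id_to_children) := by unfold Pre_is_descendant_at_generation_py; infer_instance

def pvWitness_is_descendant_at_generation_py : String × String × Int × (List (String × List String)) :=
  ("A", "C", 2, [("A", ["B"]), ("B", ["C"])])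

def Spec_is_descendant_at_generation_py (ancestor_id : String) (descendant_id : String) (generations : Int) (id_to_children : List (String × List String)) (out : Bool) : Prop := out = is_descendant_at_generation_py_alt ancestor_id descendant_id generations id_to_children
instance (ancestor_id : String) (descendant_id : String) (generations : Int) (id_to_children : List (String × List String)) (out : Bool) : Decidable (Spec_is_descendant_at_generation_py ancestor_id descendant_id generations id_to_children out) := by unfold Spec_is_descendant_at_generation_py; infer_instance

-- ===== CLAIM (what is proved, stated in full; the proofs are below) =====
def Claim_equal_is_descendant_at_generation_py : Prop := ∀ (ancestor_id : String) (descendant_id : String) (generations : Int) (id_to_children : List (String × List String)), Dom_is_descendant_at_generation_py ancestor_id descendant_id generations id_to_children → Pre_is_descendant_at_generation_py ancestor_id descendant_id generations id_to_children → Spec_is_descendant_at_generation_py ancestor_id descendant_id generations id_to_children (is_descendant_at_generation_py ancestor_id descendant_id generations id_to_children)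

-- ===== LEMMAS AND PROOFS =====

-- "y is reachable from x in exactly n child-steps of id_to_children"
def pvReach (m : List (String × List String)) : Nat → String → String → Prop
  | 0, x, y => x = y
  | n + 1, x, y => ∃ c ∈ (PySem.Dict.mk m).getD x [], pvReach m n c y

-- membership in a frontier built by folding Set.update
theorem pv_mem_foldl_update {y : String} (f : String → PySem.Set String) (l : List String) (s : PySem.Set String) :
    y ∈ l.foldl (fun acc p => PySem.Set.update acc (f p)) s ↔ y ∈ s ∨ ∃ p ∈ l, y ∈ f p := by
  induction l generalizing s with
  | nil => simp
  | cons p l ih =>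
    simp only [List.foldl_cons, ih, PySem.Set.mem_update, List.mem_cons]
    constructor
    · rintro ((h | h) | ⟨q, hq, hy⟩)
      · exact Or.inl h
      · exact Or.inr ⟨p, Or.inl rfl, h⟩
      · exact Or.inr ⟨q, Or.inr hq, hy⟩
    · rintro (h | ⟨q, (rfl | hq), hy⟩)
      · exact Or.inl (Or.inl h)
      · exact Or.inl (Or.inr hy)
      · exact Or.inr ⟨q, hq, hy⟩

-- A's loop answers: is the target reachable in n steps from some member of the frontier?
theorem pvALoop_iff (m : List (String × List String)) (d : String) (n : Nat) (cur : PySem.Set String) :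
    pvALoop m d n cur = true ↔ ∃ x ∈ cur, pvReach m n x d := by
  induction n generalizing cur with
  | zero =>
    simp [pvALoop, pvReach]
  | succ n ih =>
    simp only [pvALoop]
    split
    · rename_i hempty
      simp only [Bool.false_eq_true, false_iff]
      rintro ⟨x, hx, c, hc, -⟩
      have : c ∈ cur.foldl (fun acc p => PySem.Set.update acc ((PySem.Dict.mk m).getD p [])) PySem.Set.empty :=
        (pv_mem_foldl_update _ cur _).mpr (Or.inr ⟨x, hx, hc⟩)
      rw [hempty] at this
      simp [PySem.Set.empty] at this
    · rw [ih]
      constructor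
      · rintro ⟨c, hc, hr⟩
        rcases (pv_mem_foldl_update _ cur _).mp hc with h | ⟨p, hp, hcp⟩
        · simp [PySem.Set.empty] at h
        · exact ⟨p, hp, c, hcp, hr⟩
      · rintro ⟨x, hx, c, hc, hr⟩
        exact ⟨c, (pv_mem_foldl_update _ cur _).mpr (Or.inr ⟨x, hx, hc⟩), hr⟩

-- reachability extended by one step at the BOTTOM
theorem pvReach_succ_right (m : List (String × List String)) (n : Nat) (x y : String) :
    pvReach m (n + 1) x y ↔ ∃ p, pvReach m n x p ∧ y ∈ (PySem.Dict.mk m).getD p [] := by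
  induction n generalizing x with
  | zero =>
    constructor
    · rintro ⟨c, hc, hcy⟩; exact ⟨x, rfl, hcy ▸ hc⟩
    · rintro ⟨p, rfl, hy⟩; exact ⟨y, hy, rfl⟩
  | succ n ih =>
    constructor
    · rintro ⟨c, hc, hr⟩
      rcases (ih c).mp hr with ⟨p, hp, hy⟩
      exact ⟨p, ⟨c, hc, hp⟩, hy⟩
    · rintro ⟨p, ⟨c, hc, hp⟩, hy⟩
      exact ⟨c, hc, (ih c).mpr ⟨p, hp, hy⟩⟩

-- characterise the grouping fold over one kids list
theorem pv_parents_inner (p0 : String) (kids : List String) (P : PySem.Dict String (PySem.Set String)) (q z : String) :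
    q ∈ (kids.foldl (fun P c => P.modify c PySem.Set.empty (fun s => PySem.Set.add s p0)) P).getD z PySem.Set.empty ↔
      q ∈ P.getD z PySem.Set.empty ∨ (q = p0 ∧ z ∈ kids) := by
  induction kids generalizing P with
  | nil => simp
  | cons c cs ih =>
    simp only [List.foldl_cons, ih, PySem.Dict.getD_modify, List.mem_cons]
    by_cases hz : z = c
    · subst hz
      simp [PySem.Set.mem_add]
      tauto
    · simp [hz]

theorem pv_parents_aux (l : List (String × List String)) (P : PySem.Dict String (PySem.Set String)) (q z : String) :
    q ∈ (l.foldl (fun P pr => pr.2.foldl (fun P c => P.modify c PySem.Set.empty (fun s => PySem.Set.add s pr.1)) P) P).getD z PySem.Set.empty ↔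
      q ∈ P.getD z PySem.Set.empty ∨ ∃ kids, (q, kids) ∈ l ∧ z ∈ kids := by
  induction l generalizing P with
  | nil => simp
  | cons pr l ih =>
    simp only [List.foldl_cons, ih, pv_parents_inner, List.mem_cons]
    constructor
    · rintro ((h | ⟨rfl, hz⟩) | ⟨kids, hk, hz⟩)
      · exact Or.inl h
      · exact Or.inr ⟨pr.2, Or.inl rfl, hz⟩
      · exact Or.inr ⟨kids, Or.inr hk, hz⟩
    · rintro (h | ⟨kids, (heq | hk), hz⟩)
      · exact Or.inl (Or.inl h)
      · cases heq
        exact Or.inl (Or.inr ⟨rfl, hz⟩)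
      · exact Or.inr ⟨kids, hk, hz⟩

-- with unique keys, the reverse index is exactly edge membership in the forward dict
theorem pv_mem_parents (m : List (String × List String)) (hnd : (m.map Prod.fst).Nodup) (q z : String) :
    q ∈ (pvParents m).getD z PySem.Set.empty ↔ z ∈ (PySem.Dict.mk m).getD q [] := by
  rw [pvParents, pv_parents_aux]
  simp only [PySem.Dict.getD_empty, PySem.Set.empty, List.not_mem_nil, false_or]
  constructor
  · rintro ⟨kids, hk, hz⟩
    have : (PySem.Dict.mk m).getD q [] = kids :=
      PySem.Dict.getD_of_mem_items (PySem.Dict.mk m) hk hnd []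
    rw [this]; exact hz
  · intro hz
    rcases h : (PySem.Dict.mk m).get? q with _ | kids
    · rw [PySem.Dict.getD_of_get?_eq_none (PySem.Dict.mk m) [] h] at hz
      simp at hz
    · rw [PySem.Dict.getD_of_get?_eq_some (PySem.Dict.mk m) [] h] at hz
      exact ⟨kids, PySem.Dict.mem_items_of_get?_eq_some (PySem.Dict.mk m) h, hz⟩

-- B's loop answers: is the ancestor reachable DOWN to some member of the frontier in n steps?
theorem pvBLoop_iff (m : List (String × List String)) (hnd : (m.map Prod.fst).Nodup) (a : String) (n : Nat) (cur : PySem.Set String) :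
    pvBLoop (pvParents m) a n cur = true ↔ ∃ z ∈ cur, pvReach m n a z := by
  induction n generalizing cur with
  | zero =>
    simp [pvBLoop, pvReach, eq_comm]
  | succ n ih =>
    simp only [pvBLoop]
    split
    · rename_i hempty
      simp only [Bool.false_eq_true, false_iff]
      rintro ⟨z, hz, hr⟩
      rcases (pvReach_succ_right m n a z).mp hr with ⟨p, -, hzp⟩
      have : p ∈ cur.foldl (fun acc x => PySem.Set.update acc ((pvParents m).getD x PySem.Set.empty)) PySem.Set.empty :=
        (pv_mem_foldl_update _ cur _).mpr (Or.inr ⟨z, hz, (pv_mem_parents m hnd p z).mpr hzp⟩)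
      rw [hempty] at this
      simp [PySem.Set.empty] at this
    · rw [ih]
      constructor
      · rintro ⟨p, hp, hr⟩
        rcases (pv_mem_foldl_update _ cur _).mp hp with h | ⟨z, hz, hpz⟩
        · simp [PySem.Set.empty] at h
        · exact ⟨z, hz, (pvReach_succ_right m n a z).mpr ⟨p, hr, (pv_mem_parents m hnd p z).mp hpz⟩⟩
      · rintro ⟨z, hz, hr⟩
        rcases (pvReach_succ_right m n a z).mp hr with ⟨p, hr', hzp⟩
        exact ⟨p, (pv_mem_foldl_update _ cur _).mpr (Or.inr ⟨z, hz, (pv_mem_parents m hnd p z).mpr hzp⟩), hr'⟩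

-- ===== VERDICT (by name: the statement is the Claim_ definition above) =====
theorem is_descendant_at_generation_py_spec : Claim_equal_is_descendant_at_generation_py := by
  intro a d g m _ hnd
  unfold Spec_is_descendant_at_generation_py
  unfold is_descendant_at_generation_py is_descendant_at_generation_py_alt
  split
  · rfl
  · rw [Bool.eq_iff_iff, pvALoop_iff, pvBLoop_iff m hnd]
    simp [PySem.Set.ofList]
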